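-- pv_equiv track=rewrite | github.com/hamza-hmaidi/Algorithm-Practice | Numbers/Sieve_Of_Eratosthenes/Noldbach_problem_codeforces.py | Noldbach
-- ===== SOURCE A (Python) =====
-- def Noldbach(n,k):
--     numbers = [True]*(n+1)
--     prev= 2
--     sum =0
--     count =0
--     sums=[]
--     for i in range(2,n):
--         if(numbers[i]==True):
--             if(i>2):
--                 sum = prev + i +1
--                 if(sum>=2 and sum<=n ):
--                     sums.append(sum)
--                 prev = i
--             for j in range(2*i,n,i):
--                 numbers[j]=False
--     for sum in sums :
--         if(numbers[sum]):
--             count+=1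
--     return (count>=k)
-- ===== SOURCE B (Python) =====
-- def Noldbach(n, k):
--     numbers = [True] * (n + 1)
--     primes = []
--     for i in range(2, n):
--         if numbers[i]:
--             primes.append(i)
--         for p in primes:
--             if i * p >= n:
--                 break
--             numbers[i * p] = False
--             if i % p == 0:
--                 break
--     count = 0
--     for p, q in zip(primes, primes[1:]):
--         s = p + q + 1
--         if s <= n and numbers[s]:
--             count += 1
--     return count >= k
-- ===== Notes on version B (the rewrite author's own statement) =====
-- stated objective: alternative
-- what changed: A runs an Eratosthenes sieve (each prime crosses off all its multiples) while collecting neighbouring-prime sums inline with a prev accumulator into a sums list and recounting them afterwards; B instead runs a linear (Euler) sieve that crosses off each composite i*p exactly once via its smallest prime factor while building the prime list, then counts the qualifying sums in a single zip pass over consecutive prime pairs with no sums list.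
import Mathlib
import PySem

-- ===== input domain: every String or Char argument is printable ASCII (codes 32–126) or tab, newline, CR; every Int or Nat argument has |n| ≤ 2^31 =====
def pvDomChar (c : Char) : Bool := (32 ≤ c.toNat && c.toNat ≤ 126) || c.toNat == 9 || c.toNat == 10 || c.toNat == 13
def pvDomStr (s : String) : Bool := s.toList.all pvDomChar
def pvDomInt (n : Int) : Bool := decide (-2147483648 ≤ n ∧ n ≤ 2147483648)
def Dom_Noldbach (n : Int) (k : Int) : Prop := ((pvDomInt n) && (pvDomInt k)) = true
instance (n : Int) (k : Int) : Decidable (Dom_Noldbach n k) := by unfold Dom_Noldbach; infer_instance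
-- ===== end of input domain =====

-- B replaces A's Eratosthenes pass (every prime crosses off all its multiples, sums
-- collected inline with a prev accumulator) by a linear (Euler) sieve: each composite
-- i*p is crossed off exactly once via its smallest prime factor, the prime list is built
-- during the pass, and the qualifying sums are counted in a separate pass over
-- consecutive prime pairs (objective: alternative algorithm; no speed claim).

-- ===== PORT A =====
-- numbers[i] : every read in A has 2 ≤ i < n < length, where Array.getD is exactly
-- Python's indexing; numbers[j] = False has 2 ≤ 2*i ≤ j < n < length, where
-- Array.setIfInBounds is exactly Python's assignment.
def pvGet (a : Array Bool) (i : Int) : Bool := a.getD i.toNat false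

-- inner loop 'for j in range(2*i, n, i): numbers[j] = False'
def pvMark (n : Int) (a : Array Bool) (i : Int) : Array Bool :=
  (PySem.List.pyRange (2*i) n i).foldl (fun a j => a.setIfInBounds j.toNat false) a

-- body of A's single loop over i, state = (numbers, prev, sums)
def pvAstep (n : Int) (st : Array Bool × Int × List Int) (i : Int) : Array Bool × Int × List Int :=
  if pvGet st.1 i then
    (pvMark n st.1 i,
     if 2 < i then
       (i, if 2 ≤ st.2.1 + i + 1 ∧ st.2.1 + i + 1 ≤ n then st.2.2 ++ [st.2.1 + i + 1] else st.2.2)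
     else (st.2.1, st.2.2))
  else st

def Noldbach (n : Int) (k : Int) : Bool :=
  let st := (PySem.List.pyRange 2 n 1).foldl (pvAstep n) (Array.replicate (n+1).toNat true, 2, ([] : List Int))
  let count : Int := st.2.2.foldl (fun c s => if pvGet st.1 s then c + 1 else c) 0
  decide (k ≤ count)

-- ===== PORT B =====
-- inner 'for p in primes: if i*p >= n: break; numbers[i*p] = False; if i % p == 0: break'
def pvEuler (n i : Int) : List Int → Array Bool → Array Bool
  | [], a => a
  | p :: ps, a =>
    if n ≤ i * p then a
    else if PySem.Int.mod i p = 0 then a.setIfInBounds (i * p).toNat false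
    else pvEuler n i ps (a.setIfInBounds (i * p).toNat false)

-- body of B's first loop over i, state = (numbers, primes)
def pvBstep (n : Int) (st : Array Bool × List Int) (i : Int) : Array Bool × List Int :=
  let pr := if pvGet st.1 i then st.2 ++ [i] else st.2
  (pvEuler n i pr st.1, pr)

def Noldbach_alt (n : Int) (k : Int) : Bool :=
  let st := (PySem.List.pyRange 2 n 1).foldl (pvBstep n) (Array.replicate (n+1).toNat true, ([] : List Int))
  let count : Int := (st.2.zip st.2.tail).foldl
    (fun c pq => if pq.1 + pq.2 + 1 ≤ n ∧ pvGet st.1 (pq.1 + pq.2 + 1) then c + 1 else c) 0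
  decide (k ≤ count)

-- ===== PRECONDITION & SPEC =====
def Spec_Noldbach (n : Int) (k : Int) (out : Bool) : Prop := out = Noldbach_alt n k
instance (n : Int) (k : Int) (out : Bool) : Decidable (Spec_Noldbach n k out) := by unfold Spec_Noldbach; infer_instance

-- ===== CLAIM (what is proved, stated in full; the proofs are below) =====
def Claim_equal_Noldbach : Prop := ∀ (n : Int) (k : Int), Dom_Noldbach n k → Spec_Noldbach n k (Noldbach n k)

-- ===== LEMMAS AND PROOFS =====

-- ---- the sieve array, factored out for the proofs ----
def pvSieveStep (n : Int) (a : Array Bool) (i : Int) : Array Bool :=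
  if pvGet a i then pvMark n a i else a

def pvSieve (n : Int) : Array Bool :=
  (PySem.List.pyRange 2 n 1).foldl (pvSieveStep n) (Array.replicate (n+1).toNat true)

def pvPrimesA (n : Int) : List Int :=
  (PySem.List.pyRange 2 n 1).filter (fun i => pvGet (pvSieve n) i)

-- the pair/sum accumulation of A, abstracted over the list of loop indices taken
def pvPairs (n : Int) (L : List Int) (pv : Int × List Int) : Int × List Int :=
  L.foldl (fun pv i =>
    if 2 < i then
      (i, if 2 ≤ pv.1 + i + 1 ∧ pv.1 + i + 1 ≤ n then pv.2 ++ [pv.1 + i + 1] else pv.2)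
    else pv) pv

-- ---- pointwise facts about setIfInBounds-folds ----
theorem pvSetFold_ne (L : List Int) (a : Array Bool) (j : Int)
    (h : ∀ m ∈ L, m.toNat ≠ j.toNat) :
    pvGet (L.foldl (fun a m => a.setIfInBounds m.toNat false) a) j = pvGet a j := by
  induction L generalizing a with
  | nil => rfl
  | cons m L ih =>
    simp only [List.foldl_cons]
    rw [ih _ (fun x hx => h x (by simp [hx]))]
    have hne : m.toNat ≠ j.toNat := h m (by simp)
    simp [pvGet, Array.getD_eq_getD_getElem?, hne]

theorem pvSetFold_false (L : List Int) (a : Array Bool) (j : Int)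
    (h : pvGet a j = false) :
    pvGet (L.foldl (fun a m => a.setIfInBounds m.toNat false) a) j = false := by
  induction L generalizing a with
  | nil => exact h
  | cons m L ih =>
    simp only [List.foldl_cons]
    apply ih
    by_cases hm : m.toNat = j.toNat
    · rw [hm]
      have hset : (a.setIfInBounds j.toNat false)[j.toNat]? = if j.toNat < a.size then some false else none := by
        rw [Array.getElem?_setIfInBounds]; simp
      simp only [pvGet, Array.getD_eq_getD_getElem?, hset]
      split
      · rfl
      · rfl
    · simpa [pvGet, Array.getD_eq_getD_getElem?, hm] using h

theorem pvSetFold_size (L : List Int) (a : Array Bool) :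
    (L.foldl (fun a m => a.setIfInBounds m.toNat false) a).size = a.size := by
  induction L generalizing a with
  | nil => rfl
  | cons m L ih => simp [List.foldl_cons, ih, Array.size_setIfInBounds]

theorem pvSetFold_mem (L : List Int) (a : Array Bool) (j : Int)
    (hj : j ∈ L) (hpos : ∀ m ∈ L, 0 < m) (hsz : j.toNat < a.size) :
    pvGet (L.foldl (fun a m => a.setIfInBounds m.toNat false) a) j = false := by
  induction L generalizing a with
  | nil => cases hj
  | cons m L ih =>
    simp only [List.foldl_cons]
    rcases List.mem_cons.1 hj with rfl | hj'
    · apply pvSetFold_false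
      simp [pvGet, Array.getD_eq_getD_getElem?, hsz]
    · exact ih _ hj' (fun x hx => hpos x (by simp [hx]))
        (by rw [Array.size_setIfInBounds]; exact hsz)

-- ---- pvMark reads ----
theorem pvMark_notmem (n : Int) (a : Array Bool) (i j : Int) (hi : 2 ≤ i) (hj : 0 ≤ j)
    (h : j ∉ PySem.List.pyRange (2*i) n i) :
    pvGet (pvMark n a i) j = pvGet a j := by
  apply pvSetFold_ne
  intro m hm hmj
  rcases (PySem.List.mem_pyRange_iff_of_pos (by omega) m).1 hm with ⟨h1, _, _⟩
  have : m = j := by omega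
  exact h (this ▸ hm)

theorem pvMark_mem (n : Int) (a : Array Bool) (i j : Int) (hi : 2 ≤ i)
    (h : j ∈ PySem.List.pyRange (2*i) n i) (hsz : j.toNat < a.size) :
    pvGet (pvMark n a i) j = false := by
  apply pvSetFold_mem _ _ _ h _ hsz
  intro m hm
  rcases (PySem.List.mem_pyRange_iff_of_pos (by omega) m).1 hm with ⟨h1, _, _⟩
  omega

theorem pvMark_size (n : Int) (a : Array Bool) (i : Int) :
    (pvMark n a i).size = a.size := pvSetFold_size _ _

-- ---- sieve-fold reads ----
theorem pvSieveFold_false (n : Int) (L : List Int) (a : Array Bool) (j : Int)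
    (h : pvGet a j = false) :
    pvGet (L.foldl (pvSieveStep n) a) j = false := by
  induction L generalizing a with
  | nil => exact h
  | cons i L ih =>
    simp only [List.foldl_cons]
    apply ih
    unfold pvSieveStep
    split
    · exact pvSetFold_false _ _ _ h
    · exact h

theorem pvSieveFold_notmem (n : Int) (L : List Int) (a : Array Bool) (j : Int) (hj : 0 ≤ j)
    (h : ∀ i ∈ L, 2 ≤ i ∧ j ∉ PySem.List.pyRange (2*i) n i) :
    pvGet (L.foldl (pvSieveStep n) a) j = pvGet a j := by
  induction L generalizing a with
  | nil => rfl
  | cons i L ih =>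
    obtain ⟨hi2, hnm⟩ := h i (by simp)
    simp only [List.foldl_cons]
    rw [ih _ (fun x hx => h x (by simp [hx]))]
    unfold pvSieveStep
    split
    · exact pvMark_notmem n a i j hi2 hj hnm
    · rfl

theorem pvSieveFold_size (n : Int) (L : List Int) (a : Array Bool) :
    (L.foldl (pvSieveStep n) a).size = a.size := by
  induction L generalizing a with
  | nil => rfl
  | cons i L ih =>
    simp only [List.foldl_cons]
    rw [ih]
    unfold pvSieveStep
    split
    · exact pvMark_size n a i
    · rfl

-- a prime index is marked by no sieve pass
theorem pvPrime_notmem (n i j : Int) (hi : 2 ≤ i) (hj : 2 ≤ j) (hp : Nat.Prime j.toNat) :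
    j ∉ PySem.List.pyRange (2*i) n i := by
  intro hmem
  rcases (PySem.List.mem_pyRange_iff_of_pos (by omega : (0:Int) < i) j).1 hmem with ⟨h1, _, h3⟩
  have hdvd : i ∣ j := by
    obtain ⟨c, hc⟩ := h3
    exact ⟨c + 2, by linear_combination hc⟩
  have hdn : i.toNat ∣ j.toNat := by
    have : (i.toNat : Int) ∣ (j.toNat : Int) := by
      rw [Int.toNat_of_nonneg (by omega : (0:Int) ≤ i), Int.toNat_of_nonneg (by omega : (0:Int) ≤ j)]
      exact hdvd
    exact Int.natCast_dvd_natCast.mp this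
  have := (Nat.prime_def_lt.mp hp).2 i.toNat (by omega) hdn
  omega

theorem pvGet_init (n j : Int) (h0 : 0 ≤ j) (h1 : j ≤ n) :
    pvGet (Array.replicate (n+1).toNat true) j = true := by
  have : j.toNat < (n+1).toNat := by omega
  simp [pvGet, Array.getD_eq_getD_getElem?, this]

-- sieve correctness, prime side (including j = n, which A's sieve never touches)
theorem pvSieve_prime (n j : Int) (h2 : 2 ≤ j) (hn : j ≤ n) (hp : Nat.Prime j.toNat) :
    pvGet (pvSieve n) j = true := by
  unfold pvSieve
  rw [pvSieveFold_notmem n _ _ j (by omega)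
      (fun i hi => ⟨(PySem.List.mem_pyRange_one.1 hi).1,
        pvPrime_notmem n i j (PySem.List.mem_pyRange_one.1 hi).1 h2 hp⟩)]
  exact pvGet_init n j (by omega) hn

-- index n is never marked at all
theorem pvSieve_top (n : Int) (h2 : 2 ≤ n) : pvGet (pvSieve n) n = true := by
  unfold pvSieve
  rw [pvSieveFold_notmem n _ _ n (by omega)
      (fun i hi => ⟨(PySem.List.mem_pyRange_one.1 hi).1, ?_⟩)]
  · exact pvGet_init n n (by omega) le_rfl
  · intro hmem
    have hi2 : 2 ≤ i := (PySem.List.mem_pyRange_one.1 hi).1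
    rcases (PySem.List.mem_pyRange_iff_of_pos (by omega : (0:Int) < i) n).1 hmem with ⟨_, hlt, _⟩
    omega

-- sieve correctness, composite side
theorem pvSieve_composite (n j : Int) (h2 : 2 ≤ j) (hn : j < n) (hp : ¬ Nat.Prime j.toNat) :
    pvGet (pvSieve n) j = false := by
  have hj2 : 2 ≤ j.toNat := by omega
  have hpp : (j.toNat.minFac).Prime := Nat.minFac_prime (by omega)
  have hdvd : j.toNat.minFac ∣ j.toNat := Nat.minFac_dvd _
  have hsq : j.toNat.minFac * j.toNat.minFac ≤ j.toNat := by
    have := Nat.minFac_sq_le_self (by omega : 0 < j.toNat) hp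
    nlinarith [this]
  set p : Int := (j.toNat.minFac : Int) with hpdef
  have hp2 : 2 ≤ p := by
    have := hpp.two_le; omega
  have hpj : 2*p ≤ j := by
    have : j.toNat.minFac + j.toNat.minFac ≤ j.toNat.minFac * j.toNat.minFac := by nlinarith [hpp.two_le]
    omega
  have hpn : p < n := by
    have : p < j := by nlinarith
    omega
  have hsplit : PySem.List.pyRange 2 n = PySem.List.pyRange 2 p ++ p :: PySem.List.pyRange (p+1) n := by
    rw [PySem.List.pyRange_one_append 2 p n (by omega) (by omega),
        PySem.List.pyRange_one_cons (by omega : p < n)]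
  unfold pvSieve
  rw [hsplit, List.foldl_append, List.foldl_cons]
  set a1 := (PySem.List.pyRange 2 p).foldl (pvSieveStep n) (Array.replicate (n+1).toNat true) with ha1
  have hsz1 : a1.size = (n+1).toNat := by
    rw [ha1, pvSieveFold_size]; simp
  have hget1 : pvGet a1 p = true := by
    rw [ha1, pvSieveFold_notmem n _ _ p (by omega)
        (fun i hi => ⟨(PySem.List.mem_pyRange_one.1 hi).1,
          pvPrime_notmem n i p (PySem.List.mem_pyRange_one.1 hi).1 hp2 (by
            have : p.toNat = j.toNat.minFac := by simp [hpdef]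
            rw [this]; exact hpp)⟩)]
    exact pvGet_init n p (by omega) (by omega)
  have hstep : pvSieveStep n a1 p = pvMark n a1 p := by simp [pvSieveStep, hget1]
  rw [hstep]
  apply pvSieveFold_false
  apply pvMark_mem n a1 p j hp2 _ (by omega)
  rw [PySem.List.mem_pyRange_iff_of_pos (by omega : (0:Int) < p)]
  refine ⟨hpj, hn, ?_⟩
  have hpj' : p ∣ j := by
    rcases hdvd with ⟨c, hc⟩
    refine ⟨(c : Int), ?_⟩
    have h1 : j = (j.toNat : Int) := by omega
    rw [h1, hpdef]
    exact_mod_cast hc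
  obtain ⟨c, hc⟩ := hpj'
  exact ⟨c - 2, by linear_combination hc⟩

-- ---- A's interleaved pass = full sieve, then the pair pass over surviving indices ----
theorem pvMain_fold (n : Int) (L : List Int) (a : Array Bool) (prev : Int) (sums : List Int)
    (h2 : ∀ i ∈ L, 2 ≤ i) (hp : L.Pairwise (· < ·)) :
    L.foldl (pvAstep n) (a, prev, sums) =
      (L.foldl (pvSieveStep n) a,
       pvPairs n (L.filter (fun i => pvGet (L.foldl (pvSieveStep n) a) i)) (prev, sums)) := by
  induction L generalizing a prev sums with
  | nil => rfl
  | cons i L ih =>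
    have hi2 : 2 ≤ i := h2 i (by simp)
    have hpL : L.Pairwise (· < ·) := hp.tail
    have hgt : ∀ j ∈ L, i < j := fun j hj => (List.pairwise_cons.1 hp).1 j hj
    have h2L : ∀ j ∈ L, 2 ≤ j := fun j hj => h2 j (by simp [hj])
    have hstab : ∀ b : Array Bool,
        pvGet (L.foldl (pvSieveStep n) (pvSieveStep n b i)) i = pvGet b i := by
      intro b
      rw [pvSieveFold_notmem n L _ i (by omega)
            (fun j hj => ⟨h2L j hj, ?_⟩)]
      · unfold pvSieveStep
        split
        · exact pvMark_notmem n b i i hi2 (by omega) (by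
            intro hmem
            rcases (PySem.List.mem_pyRange_iff_of_pos (by omega : (0:Int) < i) i).1 hmem with ⟨hge, _, _⟩
            omega)
        · rfl
      · intro hmem
        have h2j := h2L j hj
        rcases (PySem.List.mem_pyRange_iff_of_pos (by omega : (0:Int) < j) i).1 hmem with ⟨hge, _, _⟩
        have := hgt j hj
        omega
    simp only [List.foldl_cons, List.filter_cons]
    by_cases hc : pvGet a i = true
    · have hstep : pvSieveStep n a i = pvMark n a i := by simp [pvSieveStep, hc]
      have hgetF : pvGet (L.foldl (pvSieveStep n) (pvSieveStep n a i)) i = true := by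
        rw [hstab a]; exact hc
      rw [hstep] at hgetF
      have hA : pvAstep n (a, prev, sums) i =
          (pvMark n a i,
           if 2 < i then
             (i, if 2 ≤ prev + i + 1 ∧ prev + i + 1 ≤ n then sums ++ [prev + i + 1] else sums)
           else (prev, sums)) := by
        simp [pvAstep, hc]
      rw [hA, hstep]
      by_cases h2i : 2 < i
      · simp only [if_pos h2i]
        rw [ih _ _ _ h2L hpL]
        simp only [hgetF, if_true]
        simp [pvPairs, h2i]
      · simp only [if_neg h2i]
        rw [ih _ _ _ h2L hpL]
        simp only [hgetF, if_true]
        simp [pvPairs, h2i]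
    · have hstep : pvSieveStep n a i = a := by simp [pvSieveStep, hc]
      have hgetF : pvGet (L.foldl (pvSieveStep n) (pvSieveStep n a i)) i = false := by
        rw [hstab a]; simpa using hc
      rw [hstep] at hgetF
      have hA : pvAstep n (a, prev, sums) i = (a, prev, sums) := by
        simp [pvAstep, hc]
      rw [hA, hstep, ih _ _ _ h2L hpL]
      simp [hgetF]

-- counting A's collected sums = counting consecutive pairs
theorem pvPairs_count (n : Int) (P : Int → Bool) :
    ∀ (rest : List Int) (prev : Int) (sums : List Int),
      (∀ q ∈ rest, 2 < q) → 0 ≤ prev →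
      ((pvPairs n rest (prev, sums)).2).countP P
        = sums.countP P
          + ((prev :: rest).zip rest).countP
              (fun pq => decide (pq.1 + pq.2 + 1 ≤ n ∧ P (pq.1 + pq.2 + 1) = true)) := by
  intro rest
  induction rest with
  | nil => intro prev sums _ _; simp [pvPairs]
  | cons q rest ih =>
    intro prev sums hq hprev
    have hq2 : 2 < q := hq q (by simp)
    have hs2 : 2 ≤ prev + q + 1 := by omega
    have hstepp : pvPairs n (q :: rest) (prev, sums)
        = pvPairs n rest (q, if 2 ≤ prev + q + 1 ∧ prev + q + 1 ≤ n then sums ++ [prev + q + 1] else sums) := by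
      simp only [pvPairs, List.foldl_cons, if_pos hq2]
    rw [hstepp, ih q _ (fun x hx => hq x (by simp [hx])) (by omega)]
    simp only [List.zip_cons_cons, List.countP_cons]
    by_cases hle : prev + q + 1 ≤ n
    · simp only [if_pos (And.intro hs2 hle)]
      rw [List.countP_append]
      by_cases hP : P (prev + q + 1) = true
      · simp [hP, hle]; omega
      · simp [hP, hle]
    · simp only [if_neg (by omega : ¬ (2 ≤ prev + q + 1 ∧ prev + q + 1 ≤ n))]
      simp [hle]

-- A's value as a count over consecutive pairs of its surviving indices
theorem pvA_count (n k : Int) :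
    Noldbach n k = decide (k ≤
      (((pvPrimesA n).zip (pvPrimesA n).tail).countP
        (fun pq => decide (pq.1 + pq.2 + 1 ≤ n ∧ pvGet (pvSieve n) (pq.1 + pq.2 + 1) = true)) : Int)) := by
  unfold Noldbach
  dsimp only
  rw [pvMain_fold n _ _ 2 [] (fun i hi => (PySem.List.mem_pyRange_one.1 hi).1)
      (PySem.List.pairwise_lt_pyRange_one 2 n)]
  by_cases hn : n ≤ 2
  · rw [PySem.List.pyRange_one_eq_nil hn]
    have : pvPrimesA n = [] := by
      unfold pvPrimesA
      rw [PySem.List.pyRange_one_eq_nil hn]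
      rfl
    simp [this, pvPairs]
  · rw [not_le] at hn
    have hcons : PySem.List.pyRange 2 n 1 = 2 :: PySem.List.pyRange 3 n 1 := by
      have := PySem.List.pyRange_one_cons (show (2:Int) < n by omega)
      simpa using this
    have hF' : (PySem.List.pyRange 2 n 1).foldl (pvSieveStep n) (Array.replicate (n+1).toNat true) = pvSieve n := rfl
    rw [hF']
    have hget2 : pvGet (pvSieve n) 2 = true :=
      pvSieve_prime n 2 (by omega) (by omega) (by decide)
    have hrest : (PySem.List.pyRange 2 n 1).filter (fun i => pvGet (pvSieve n) i)
        = 2 :: (PySem.List.pyRange 3 n 1).filter (fun i => pvGet (pvSieve n) i) := by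
      rw [hcons]; simp only [List.filter_cons, hget2, if_true]
    have hPA : pvPrimesA n = 2 :: (PySem.List.pyRange 3 n 1).filter (fun i => pvGet (pvSieve n) i) := hrest
    rw [hrest]
    have hskip : pvPairs n (2 :: (PySem.List.pyRange 3 n 1).filter (fun i => pvGet (pvSieve n) i)) (2, ([] : List Int))
        = pvPairs n ((PySem.List.pyRange 3 n 1).filter (fun i => pvGet (pvSieve n) i)) (2, []) := by
      simp [pvPairs]
    rw [hskip]
    rw [PySem.List.foldl_count_if]
    rw [pvPairs_count n _ _ 2 []
          (fun q hq => by
            have := (PySem.List.mem_pyRange_one.1 (List.mem_of_mem_filter hq)).1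
            omega)
          (by omega)]
    rw [hPA]
    simp [List.tail]

-- ---- B's marking pass: the list of indices one outer iteration crosses off ----
def pvMarksOf (n i : Int) : List Int → List Int
  | [] => []
  | p :: ps =>
    if n ≤ i * p then []
    else if PySem.Int.mod i p = 0 then [i * p]
    else i * p :: pvMarksOf n i ps

theorem pvEuler_eq (n i : Int) (ps : List Int) (a : Array Bool) :
    pvEuler n i ps a
      = (pvMarksOf n i ps).foldl (fun a m => a.setIfInBounds m.toNat false) a := by
  induction ps generalizing a with
  | nil => rfl
  | cons p ps ih =>
    simp only [pvEuler, pvMarksOf]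
    by_cases h1 : n ≤ i * p
    · rw [if_pos h1, if_pos h1]
      rfl
    · rw [if_neg h1, if_neg h1]
      by_cases h2 : PySem.Int.mod i p = 0
      · rw [if_pos h2, if_pos h2]
        rfl
      · rw [if_neg h2, if_neg h2]
        simp only [List.foldl_cons]
        exact ih _

theorem pvMarksOf_mem (n i : Int) :
    ∀ (ps : List Int) (x : Int), ps.Pairwise (· < ·) → x ∈ pvMarksOf n i ps →
      ∃ p ∈ ps, x = i * p ∧ x < n ∧ (∀ r ∈ ps, r < p → ¬ (r ∣ i)) := by
  intro ps
  induction ps with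
  | nil => intro x _ hx; cases hx
  | cons p ps ih =>
    intro x hs hx
    simp only [pvMarksOf] at hx
    by_cases h1 : n ≤ i * p
    · rw [if_pos h1] at hx; cases hx
    · rw [if_neg h1] at hx
      have hhead : ∀ r ∈ p :: ps, r < p → ¬ (r ∣ i) → True := fun _ _ _ _ => trivial
      by_cases h2 : PySem.Int.mod i p = 0
      · rw [if_pos h2] at hx
        rcases List.mem_singleton.1 hx with rfl
        refine ⟨p, by simp, rfl, by omega, ?_⟩
        intro r hr hrp
        rcases List.mem_cons.1 hr with rfl | hr'
        · omega
        · have := (List.pairwise_cons.1 hs).1 r hr'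
          omega
      · rw [if_neg h2] at hx
        rcases List.mem_cons.1 hx with rfl | hx'
        · refine ⟨p, by simp, rfl, by omega, ?_⟩
          intro r hr hrp
          rcases List.mem_cons.1 hr with rfl | hr'
          · omega
          · have := (List.pairwise_cons.1 hs).1 r hr'
            omega
        · rcases ih x hs.tail hx' with ⟨p', hp', hxe, hxn, hnb⟩
          refine ⟨p', by simp [hp'], hxe, hxn, ?_⟩
          intro r hr hrp'
          rcases List.mem_cons.1 hr with rfl | hr'
          · intro hdvd
            exact h2 ((PySem.Int.mod_eq_zero_iff_dvd i r).2 hdvd)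
          · exact hnb r hr' hrp'

theorem pvMarksOf_complete (n i : Int) :
    ∀ (ps : List Int) (p0 : Int), p0 ∈ ps → ps.Pairwise (· < ·) → i * p0 < n → 0 < i →
      (∀ p ∈ ps, p < p0 → ¬ (p ∣ i)) → i * p0 ∈ pvMarksOf n i ps := by
  intro ps
  induction ps with
  | nil => intro p0 h; cases h
  | cons p ps ih =>
    intro p0 hmem hs hn hi hnb
    simp only [pvMarksOf]
    rcases List.mem_cons.1 hmem with rfl | hmem'
    · rw [if_neg (by omega)]
      by_cases h2 : PySem.Int.mod i p0 = 0
      · rw [if_pos h2]; simp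
      · rw [if_neg h2]; simp
    · have hpp0 : p < p0 := (List.pairwise_cons.1 hs).1 p0 hmem'
      have hipn : i * p < n := by nlinarith
      rw [if_neg (by omega)]
      have hnd : ¬ (p ∣ i) := hnb p (by simp) hpp0
      have h2 : ¬ PySem.Int.mod i p = 0 := fun h => hnd ((PySem.Int.mod_eq_zero_iff_dvd i p).1 h)
      rw [if_neg h2]
      exact List.mem_cons_of_mem _ (ih p0 hmem' hs.tail hn hi
        (fun q hq hqlt => hnb q (by simp [hq]) hqlt))

-- ---- smallest-prime-factor arithmetic ----
def pvCof (j : Int) : Int := ((j.toNat / j.toNat.minFac : Nat) : Int)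

theorem pvCof_facts (j : Int) (h2 : 2 ≤ j) (hnp : ¬ Nat.Prime j.toNat) :
    2 ≤ pvCof j ∧ 2 * pvCof j ≤ j ∧ j = pvCof j * (j.toNat.minFac : Int) ∧ pvCof j < j := by
  have ht2 : 2 ≤ j.toNat := by omega
  have hp : j.toNat.minFac.Prime := Nat.minFac_prime (by omega)
  have hp2 : 2 ≤ j.toNat.minFac := hp.two_le
  have hdvd : j.toNat.minFac ∣ j.toNat := Nat.minFac_dvd _
  have hmc : j.toNat.minFac * (j.toNat / j.toNat.minFac) = j.toNat := Nat.mul_div_cancel' hdvd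
  have hlediv : j.toNat.minFac ≤ j.toNat / j.toNat.minFac := Nat.minFac_le_div (by omega) hnp
  have hc2 : 2 ≤ j.toNat / j.toNat.minFac := by omega
  refine ⟨by unfold pvCof; omega, ?_, ?_, ?_⟩
  · unfold pvCof
    have : 2 * (j.toNat / j.toNat.minFac) ≤ j.toNat.minFac * (j.toNat / j.toNat.minFac) := by
      apply Nat.mul_le_mul_right
      omega
    omega
  · unfold pvCof
    have hcast : ((j.toNat.minFac * (j.toNat / j.toNat.minFac) : Nat) : Int)
        = ((j.toNat : Nat) : Int) := by exact_mod_cast congrArg (fun x : Nat => (x : Int)) hmc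
    push_cast at hcast
    rw [mul_comm]
    omega
  · unfold pvCof
    have : j.toNat / j.toNat.minFac < j.toNat := by
      have h1 : 2 * (j.toNat / j.toNat.minFac) ≤ j.toNat.minFac * (j.toNat / j.toNat.minFac) :=
        Nat.mul_le_mul_right _ (by omega)
      omega
    omega

theorem pvMinFac_mul (i p : Int) (hi : 2 ≤ i) (hp2 : 2 ≤ p) (hpp : Nat.Prime p.toNat)
    (hnd : ∀ r : Int, 2 ≤ r → r < p → Nat.Prime r.toNat → ¬ (r ∣ i)) :
    (i * p).toNat.minFac = p.toNat ∧ pvCof (i * p) = i := by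
  have htm : (i * p).toNat = i.toNat * p.toNat := by
    have hi' : (i.toNat : Int) = i := by omega
    have hp' : (p.toNat : Int) = p := by omega
    have h1 : ((i.toNat * p.toNat : Nat) : Int) = i * p := by rw [Nat.cast_mul, hi', hp']
    omega
  have hdvdp : p.toNat ∣ (i * p).toNat := ⟨i.toNat, by rw [htm, Nat.mul_comm]⟩
  have hge4 : 4 ≤ (i * p).toNat := by
    rw [htm]
    calc 4 = 2 * 2 := rfl
    _ ≤ i.toNat * p.toNat := Nat.mul_le_mul (by omega) (by omega)
  have hle : (i * p).toNat.minFac ≤ p.toNat := Nat.minFac_le_of_dvd (by omega) hdvdp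
  have hmfp : (i * p).toNat.minFac.Prime := Nat.minFac_prime (by omega)
  have hmfd : (i * p).toNat.minFac ∣ i.toNat * p.toNat := htm ▸ Nat.minFac_dvd _
  have heq : (i * p).toNat.minFac = p.toNat := by
    by_contra hne
    have hlt : (i * p).toNat.minFac < p.toNat := by omega
    rcases (Nat.Prime.dvd_mul hmfp).1 hmfd with hdi | hdp
    · refine hnd ((i * p).toNat.minFac : Int) (by have := hmfp.two_le; omega)
        (by omega) (by simpa using hmfp) ?_
      have : ((i * p).toNat.minFac : Int) ∣ (i.toNat : Int) := Int.natCast_dvd_natCast.2 hdi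
      have hii : (i.toNat : Int) = i := by omega
      rwa [hii] at this
    · rcases (Nat.Prime.eq_one_or_self_of_dvd (by simpa using hpp) _ hdp) with h1 | h1
      · have := hmfp.two_le; omega
      · omega
  constructor
  · exact heq
  · unfold pvCof
    rw [heq, htm]
    have hdiv : i.toNat * p.toNat / p.toNat = i.toNat := by
      rw [Nat.mul_div_assoc _ (dvd_refl _), Nat.div_self (by omega), Nat.mul_one]
    rw [hdiv]
    omega

-- j is composite when it factors with both parts ≥ 2
theorem pvNotPrime_mul (i p : Int) (hi : 2 ≤ i) (hp : 2 ≤ p) : ¬ Nat.Prime (i * p).toNat := by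
  intro hpr
  have htm : (i * p).toNat = i.toNat * p.toNat := by
    have hi' : (i.toNat : Int) = i := by omega
    have hp' : (p.toNat : Int) = p := by omega
    have h1 : ((i.toNat * p.toNat : Nat) : Int) = i * p := by rw [Nat.cast_mul, hi', hp']
    omega
  have hdvdp : p.toNat ∣ (i * p).toNat := ⟨i.toNat, by rw [htm, Nat.mul_comm]⟩
  rcases (Nat.Prime.eq_one_or_self_of_dvd hpr _ hdvdp) with h1 | h1
  · omega
  · have : 2 * p.toNat ≤ i.toNat * p.toNat := Nat.mul_le_mul_right _ (by omega)
    omega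

-- the state B's sieve loop has reached: marked ↔ composite below n with cofactor < m
def pvMkd (n m j : Int) : Prop := 2 ≤ j ∧ j < n ∧ ¬ Nat.Prime j.toNat ∧ pvCof j < m

-- members of the running prime list
theorem pvPrF_mem (m x : Int)
    (hx : x ∈ (PySem.List.pyRange 2 m).filter (fun y => decide (Nat.Prime y.toNat))) :
    2 ≤ x ∧ x < m ∧ Nat.Prime x.toNat := by
  rcases List.mem_filter.1 hx with ⟨h1, h2⟩
  rcases PySem.List.mem_pyRange_one.1 h1 with ⟨ha, hb⟩
  exact ⟨ha, hb, of_decide_eq_true h2⟩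

theorem pvPrF_complete (m r : Int) (h2 : 2 ≤ r) (hlt : r < m) (hp : Nat.Prime r.toNat) :
    r ∈ (PySem.List.pyRange 2 m).filter (fun y => decide (Nat.Prime y.toNat)) :=
  List.mem_filter.2 ⟨PySem.List.mem_pyRange_one.2 ⟨h2, hlt⟩, decide_eq_true hp⟩

-- one outer iteration of B preserves the invariant
theorem pvBstep_inv (n m : Int) (a : Array Bool) (pr : List Int)
    (h2 : 2 ≤ m) (hmn : m < n)
    (hsz : a.size = (n+1).toNat)
    (hchar : ∀ j : Int, 0 ≤ j → j ≤ n → (pvGet a j = false ↔ pvMkd n m j))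
    (hpr : pr = (PySem.List.pyRange 2 m).filter (fun y => decide (Nat.Prime y.toNat))) :
    (pvBstep n (a, pr) m).2
        = (PySem.List.pyRange 2 (m+1)).filter (fun y => decide (Nat.Prime y.toNat)) ∧
    (pvBstep n (a, pr) m).1.size = (n+1).toNat ∧
    (∀ j : Int, 0 ≤ j → j ≤ n →
      (pvGet (pvBstep n (a, pr) m).1 j = false ↔ pvMkd n (m+1) j)) := by
  have hrange : PySem.List.pyRange 2 (m+1) = PySem.List.pyRange 2 m ++ [m] := by
    simpa using PySem.List.pyRange_one_succ_right (a := 2) (b := m) (by omega)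
  have hget : pvGet a m = false ↔ ¬ Nat.Prime m.toNat := by
    rw [hchar m (by omega) (by omega)]
    unfold pvMkd
    constructor
    · rintro ⟨_, _, hnp, _⟩; exact hnp
    · intro hnp
      exact ⟨h2, hmn, hnp, (pvCof_facts m h2 hnp).2.2.2⟩
  have hpr' : (if pvGet a m then pr ++ [m] else pr)
      = (PySem.List.pyRange 2 (m+1)).filter (fun y => decide (Nat.Prime y.toNat)) := by
    rw [hrange, List.filter_append, hpr]
    by_cases hp : Nat.Prime m.toNat
    · have : pvGet a m = true := by
        cases hgm : pvGet a m
        · exact absurd (hget.1 hgm) (by simpa using hp)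
        · rfl
      rw [this]
      simp [hp]
    · have : pvGet a m = false := hget.2 hp
      rw [this]
      simp [hp]
  set prN := (PySem.List.pyRange 2 (m+1)).filter (fun y => decide (Nat.Prime y.toNat)) with hprN
  have hstep : pvBstep n (a, pr) m = (pvEuler n m prN a, prN) := by
    unfold pvBstep
    simp only [← hpr']
  have hsorted : prN.Pairwise (· < ·) :=
    List.Pairwise.filter _ (PySem.List.pairwise_lt_pyRange_one 2 (m+1))
  rw [hstep]
  refine ⟨rfl, ?_, ?_⟩
  · rw [pvEuler_eq, pvSetFold_size]
    exact hsz
  intro j hj0 hjn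
  rw [pvEuler_eq]
  by_cases hja : pvGet a j = false
  · rw [pvSetFold_false _ _ _ hja]
    have hm := (hchar j hj0 hjn).1 hja
    unfold pvMkd at hm ⊢
    constructor
    · intro _; exact ⟨hm.1, hm.2.1, hm.2.2.1, by omega⟩
    · intro _; rfl
  · have hja' : pvGet a j = true := by
      cases h : pvGet a j
      · exact absurd h hja
      · rfl
    have hnm : ¬ pvMkd n m j := fun h => hja ((hchar j hj0 hjn).2 h)
    by_cases hjm : j ∈ pvMarksOf n m prN
    · have hpos : ∀ x ∈ pvMarksOf n m prN, 0 < x := by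
        intro x hx
        rcases pvMarksOf_mem n m prN x hsorted hx with ⟨p, hp, rfl, _, _⟩
        have := pvPrF_mem (m+1) p hp
        nlinarith [this.1]
      have hxlt : j < n := by
        rcases pvMarksOf_mem n m prN j hsorted hjm with ⟨p, hp, rfl, hlt, _⟩
        exact hlt
      rw [pvSetFold_mem _ _ _ hjm hpos (by omega)]
      rcases pvMarksOf_mem n m prN j hsorted hjm with ⟨p, hp, hje, hlt, hnb⟩
      obtain ⟨hpa, hpb, hpc⟩ := pvPrF_mem (m+1) p hp
      have hmf := pvMinFac_mul m p h2 hpa hpc (by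
        intro r hr2 hrp hrpr hdvd
        exact hnb r (pvPrF_complete (m+1) r hr2 (by omega) hrpr) hrp hdvd)
      constructor
      · intro _
        refine ⟨by nlinarith, hje ▸ hlt, hje ▸ pvNotPrime_mul m p h2 hpa, ?_⟩
        rw [hje, hmf.2]
        omega
      · intro _; rfl
    · rw [pvSetFold_ne]
      · constructor
        · intro h; exact absurd h hja
        · intro hmk
          exfalso
          unfold pvMkd at hmk hnm
          obtain ⟨hj2, hjln, hjnp, hcof⟩ := hmk
          have hcofm : pvCof j = m := by
            by_cases hc : pvCof j < m
            · exact absurd ⟨hj2, hjln, hjnp, hc⟩ hnm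
            · omega
          obtain ⟨hc2, hc2j, hjfac, hcj⟩ := pvCof_facts j hj2 hjnp
          have hp0 : (j.toNat.minFac : Int) ∈ prN := by
            apply pvPrF_complete
            · have := (Nat.minFac_prime (show j.toNat ≠ 1 by omega)).two_le
              omega
            · have : (j.toNat.minFac : Int) ≤ pvCof j := by
                have := Nat.minFac_le_div (show 0 < j.toNat by omega) hjnp
                unfold pvCof
                omega
              omega
            · simpa using Nat.minFac_prime (show j.toNat ≠ 1 by omega)
          set f := ((j.toNat.minFac : Nat) : Int) with hf
          have hje : j = m * f := by rw [hjfac, hcofm]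
          apply hjm
          rw [hje]
          refine pvMarksOf_complete n m prN f hp0 hsorted
            (by rw [← hje]; exact hjln) (by omega) ?_
          intro p hpmem hplt hdvd
          obtain ⟨hpa, hpb, hpc⟩ := pvPrF_mem (m+1) p hpmem
          have hdj : p ∣ j := by
            rw [hje]
            exact Dvd.dvd.mul_right hdvd _
          have hdn : p.toNat ∣ j.toNat := by
            have h1 : (p.toNat : Int) ∣ (j.toNat : Int) := by
              rw [Int.toNat_of_nonneg (by omega : (0:Int) ≤ p),
                  Int.toNat_of_nonneg (by omega : (0:Int) ≤ j)]
              exact hdj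
            exact Int.natCast_dvd_natCast.mp h1
          have := Nat.minFac_le_of_dvd (by omega) hdn
          omega
      · intro x hx hxj
        have hpos : 0 < x := by
          rcases pvMarksOf_mem n m prN x hsorted hx with ⟨p, hp, rfl, _, _⟩
          have := pvPrF_mem (m+1) p hp
          nlinarith [this.1]
        have : x = j := by omega
        exact hjm (this ▸ hx)

-- B's whole sieve pass, by induction along the outer range
theorem pvBfold_inv (n : Int) : ∀ (d : Nat) (m : Int) (a : Array Bool) (pr : List Int),
    (n - m).toNat ≤ d → 2 ≤ m → m ≤ n →
    a.size = (n+1).toNat →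
    (∀ j : Int, 0 ≤ j → j ≤ n → (pvGet a j = false ↔ pvMkd n m j)) →
    pr = (PySem.List.pyRange 2 m).filter (fun y => decide (Nat.Prime y.toNat)) →
    ((PySem.List.pyRange m n).foldl (pvBstep n) (a, pr)).2
        = (PySem.List.pyRange 2 n).filter (fun y => decide (Nat.Prime y.toNat)) ∧
    (∀ j : Int, 0 ≤ j → j ≤ n →
      (pvGet ((PySem.List.pyRange m n).foldl (pvBstep n) (a, pr)).1 j = false ↔ pvMkd n n j)) := by
  intro d
  induction d with
  | zero =>
    intro m a pr hd h2 hmn hsz hchar hpr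
    have hmn' : m = n := by omega
    subst hmn'
    rw [PySem.List.pyRange_one_eq_nil le_rfl]
    exact ⟨hpr, hchar⟩
  | succ d ih =>
    intro m a pr hd h2 hmn hsz hchar hpr
    by_cases hlt : m < n
    · rw [PySem.List.pyRange_one_cons hlt, List.foldl_cons]
      obtain ⟨hs1, hs2, hs3⟩ := pvBstep_inv n m a pr h2 hlt hsz hchar hpr
      have hres := ih (m+1) (pvBstep n (a, pr) m).1 (pvBstep n (a, pr) m).2
        (by omega) (by omega) (by omega) hs2 hs3 hs1
      simpa using hres
    · have hmn' : m = n := by omega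
      subst hmn'
      rw [PySem.List.pyRange_one_eq_nil le_rfl]
      exact ⟨hpr, hchar⟩

-- the full characterisation of B's sieve state
theorem pvBsieve_char (n : Int) :
    ((PySem.List.pyRange 2 n).foldl (pvBstep n)
        (Array.replicate (n+1).toNat true, ([] : List Int))).2
      = (PySem.List.pyRange 2 n).filter (fun y => decide (Nat.Prime y.toNat)) ∧
    (∀ j : Int, 0 ≤ j → j ≤ n →
      (pvGet ((PySem.List.pyRange 2 n).foldl (pvBstep n)
          (Array.replicate (n+1).toNat true, ([] : List Int))).1 j = false ↔ pvMkd n n j)) := by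
  by_cases hn : n ≤ 2
  · rw [PySem.List.pyRange_one_eq_nil hn]
    simp only [List.foldl_nil, List.filter_nil]
    refine ⟨by simp, ?_⟩
    intro j hj0 hjn
    rw [pvGet_init n j hj0 hjn]
    unfold pvMkd
    constructor
    · intro h; simp at h
    · rintro ⟨ha, hb, _, _⟩; omega
  · push_neg at hn
    refine pvBfold_inv n (n - 2).toNat 2 (Array.replicate (n+1).toNat true) [] le_rfl
      (by omega) (by omega) (by simp) ?_ ?_
    · intro j hj0 hjn
      rw [pvGet_init n j hj0 hjn]
      unfold pvMkd
      constructor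
      · intro h; simp at h
      · rintro ⟨ha, hb, hc, hd⟩
        have := (pvCof_facts j ha hc).1
        omega
    · rw [PySem.List.pyRange_one_eq_nil le_rfl]
      rfl

-- A's survivor list is the list of primes below n
theorem pvPrimesA_eq (n : Int) :
    pvPrimesA n = (PySem.List.pyRange 2 n).filter (fun y => decide (Nat.Prime y.toNat)) := by
  unfold pvPrimesA
  apply List.filter_congr
  intro i hi
  rcases PySem.List.mem_pyRange_one.1 hi with ⟨h2, hlt⟩
  by_cases hp : Nat.Prime i.toNat
  · rw [pvSieve_prime n i h2 (by omega) hp]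
    simp [hp]
  · rw [pvSieve_composite n i h2 hlt hp]
    simp [hp]

-- B's value as a count over consecutive pairs of its prime list
theorem pvB_count (n k : Int) :
    Noldbach_alt n k = decide (k ≤
      ((((PySem.List.pyRange 2 n).filter (fun y => decide (Nat.Prime y.toNat))).zip
          ((PySem.List.pyRange 2 n).filter (fun y => decide (Nat.Prime y.toNat))).tail).countP
        (fun pq => decide (pq.1 + pq.2 + 1 ≤ n ∧
          pvGet ((PySem.List.pyRange 2 n).foldl (pvBstep n)
            (Array.replicate (n+1).toNat true, ([] : List Int))).1 (pq.1 + pq.2 + 1) = true)) : Int)) := by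
  unfold Noldbach_alt
  dsimp only
  rw [(pvBsieve_char n).1]
  have hconv : (fun (c : Int) (pq : Int × Int) =>
      if pq.1 + pq.2 + 1 ≤ n ∧ pvGet ((PySem.List.pyRange 2 n).foldl (pvBstep n)
          (Array.replicate (n+1).toNat true, ([] : List Int))).1 (pq.1 + pq.2 + 1) = true
      then c + 1 else c)
      = (fun (c : Int) (pq : Int × Int) =>
        if (fun pq : Int × Int => decide (pq.1 + pq.2 + 1 ≤ n ∧
            pvGet ((PySem.List.pyRange 2 n).foldl (pvBstep n)
              (Array.replicate (n+1).toNat true, ([] : List Int))).1 (pq.1 + pq.2 + 1) = true)) pq = true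
        then c + 1 else c) := by
    funext c pq
    simp
  rw [hconv, PySem.List.foldl_count_if]
  simp

-- ===== VERDICT (by name: the statement is the Claim_ definition above) =====
theorem Noldbach_spec : Claim_equal_Noldbach := by
  intro n k _
  unfold Spec_Noldbach
  rw [pvA_count, pvB_count, pvPrimesA_eq]
  have hc : (((PySem.List.pyRange 2 n).filter (fun y => decide (Nat.Prime y.toNat))).zip
        ((PySem.List.pyRange 2 n).filter (fun y => decide (Nat.Prime y.toNat))).tail).countP
      (fun pq => decide (pq.1 + pq.2 + 1 ≤ n ∧ pvGet (pvSieve n) (pq.1 + pq.2 + 1) = true))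
      = (((PySem.List.pyRange 2 n).filter (fun y => decide (Nat.Prime y.toNat))).zip
        ((PySem.List.pyRange 2 n).filter (fun y => decide (Nat.Prime y.toNat))).tail).countP
      (fun pq => decide (pq.1 + pq.2 + 1 ≤ n ∧
        pvGet ((PySem.List.pyRange 2 n).foldl (pvBstep n)
          (Array.replicate (n+1).toNat true, ([] : List Int))).1 (pq.1 + pq.2 + 1) = true)) := by
    apply List.countP_congr
    rintro ⟨x, y⟩ hpq
    have hmem := List.of_mem_zip hpq
    obtain ⟨hx2, hxn, hxp⟩ := pvPrF_mem n x hmem.1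
    obtain ⟨hy2, hyn, hyp⟩ := pvPrF_mem n y (List.mem_of_mem_tail hmem.2)
    simp only [decide_eq_true_eq]
    set s := x + y + 1 with hs
    have hchar := (pvBsieve_char n).2
    constructor
    · rintro ⟨hle, hget⟩
      refine ⟨hle, ?_⟩
      cases hB : pvGet ((PySem.List.pyRange 2 n).foldl (pvBstep n)
          (Array.replicate (n+1).toNat true, ([] : List Int))).1 s
      · exfalso
        have hmk := (hchar s (by omega) hle).1 hB
        unfold pvMkd at hmk
        obtain ⟨_, hsn, hsnp, _⟩ := hmk
        rw [pvSieve_composite n s (by omega) hsn hsnp] at hget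
        cases hget
      · rfl
    · rintro ⟨hle, hget⟩
      refine ⟨hle, ?_⟩
      cases hA : pvGet (pvSieve n) s
      · exfalso
        by_cases hsn : s < n
        · by_cases hsp : Nat.Prime s.toNat
          · rw [pvSieve_prime n s (by omega) (by omega) hsp] at hA
            cases hA
          · have hBf : pvGet ((PySem.List.pyRange 2 n).foldl (pvBstep n)
                (Array.replicate (n+1).toNat true, ([] : List Int))).1 s = false := by
              rw [hchar s (by omega) hle]
              refine ⟨by omega, hsn, hsp, ?_⟩
              have := (pvCof_facts s (by omega) hsp).2.2.2
              omega
            rw [hBf] at hget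
            cases hget
        · have hseq : s = n := by omega
          rw [hseq, pvSieve_top n (by omega)] at hA
          cases hA
      · rfl
  rw [hc]
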